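-- pv_equiv track=rewrite | github.com/Spongeorge/long-context-multihop | scripts/make_qa_prompts.py | order_input
-- ===== SOURCE A (Python) =====
-- from copy import deepcopy
--
-- def order_input(distractors, golds, gold_positions):
--     distractors = deepcopy(distractors)
--     context = []
--     total_len = len(distractors) + len(golds)
--     golds_len = len(golds)
--     i = 0
--     while i < total_len:
--         if i in gold_positions:
--             context.append(golds[gold_positions.index(i)])
--             golds_len -= 1
--         else:
--             if len(distractors) > 0:
--                 context.append(distractors.pop(0))
--
--         i += 1
--
--     # For rare cases where hotpot had fewer than 20 docs:
--     # place any remaining gold evidence at the end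
--     while golds_len > 0:
--         context.append(golds[2 - golds_len])
--         golds_len -= 1
--
--     return context
-- ===== SOURCE B (Python) =====
-- def order_input(distractors, golds, gold_positions):
--     # dict: position -> index of its first occurrence in gold_positions
--     first = {}
--     for j, p in enumerate(gold_positions):
--         if p not in first:
--             first[p] = j
--     total_len = len(distractors) + len(golds)
--     context = []
--     d = 0
--     matched = 0
--     for i in range(total_len):
--         j = first.get(i)
--         if j is not None:
--             context.append(golds[j])
--             matched += 1
--         elif d < len(distractors):
--             context.append(distractors[d])
--             d += 1
--     for k in range(2 - (len(golds) - matched), 2):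
--         context.append(golds[k])
--     return context
-- ===== Notes on version B (the rewrite author's own statement) =====
-- stated objective: faster
-- what changed: B precomputes a dict mapping position to the first gold index and walks distractors with an index, replacing A's per-step 'in'/'.index' scans and O(n) pop(0) with O(1) lookups in a single pass.
import Mathlib
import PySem

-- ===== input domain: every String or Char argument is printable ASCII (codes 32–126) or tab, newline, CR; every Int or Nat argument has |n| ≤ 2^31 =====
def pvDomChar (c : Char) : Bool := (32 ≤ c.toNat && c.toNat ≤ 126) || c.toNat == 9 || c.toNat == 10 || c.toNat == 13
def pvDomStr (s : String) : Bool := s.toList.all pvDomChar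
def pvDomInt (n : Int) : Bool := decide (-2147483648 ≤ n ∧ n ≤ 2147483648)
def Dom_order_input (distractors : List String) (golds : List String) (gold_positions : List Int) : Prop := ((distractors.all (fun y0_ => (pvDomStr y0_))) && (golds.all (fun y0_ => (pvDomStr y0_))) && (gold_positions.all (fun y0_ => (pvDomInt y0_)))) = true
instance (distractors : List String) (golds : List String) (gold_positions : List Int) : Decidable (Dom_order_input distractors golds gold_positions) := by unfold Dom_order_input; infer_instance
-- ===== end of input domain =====

-- B replaces A's per-position 'in'/'.index' scans and O(n) pop(0) by a precomputed
-- position->first-gold-index dict and a distractor cursor: one pass, asymptotically faster.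

-- ===== PORT A =====
-- one step of A's main while-loop; state = (remaining distractors, context, golds_len)
def order_input_stepA (golds : List String) (gold_positions : List Int)
    (st : List String × List String × Int) (i : Int) : List String × List String × Int :=
  if gold_positions.contains i then
    (st.1, st.2.1 ++ [((PySem.List.index? gold_positions i).bind
        (fun j => PySem.List.pyGet? golds (j : Int))).getD ""], st.2.2 - 1)
  else if 0 < st.1.length then
    match PySem.List.pop? st.1 0 with
    | some r => (r.2, st.2.1 ++ [r.1], st.2.2)
    | none => st
  else st

-- A's trailing while-loop: while golds_len > 0: append golds[2 - golds_len]
def order_input_tailA (golds : List String) (ctx : List String) (gl : Int) : List String :=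
  if h : 0 < gl then
    order_input_tailA golds (ctx ++ [(PySem.List.pyGet? golds (2 - gl)).getD ""]) (gl - 1)
  else ctx
termination_by gl.toNat
decreasing_by omega

def order_input (distractors : List String) (golds : List String) (gold_positions : List Int) : List String :=
  let total : Int := (distractors.length : Int) + golds.length
  let st := (PySem.List.pyRange 0 total 1).foldl (order_input_stepA golds gold_positions)
      (distractors, ([] : List String), (golds.length : Int))
  order_input_tailA golds st.2.1 st.2.2

-- ===== PORT B =====
-- first = {}; for j, p in enumerate(gold_positions): if p not in first: first[p] = j
def order_input_firstB (gold_positions : List Int) : PySem.Dict Int Int :=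
  (PySem.List.enumerate gold_positions 0).foldl
    (fun d jp => if d.contains jp.2 then d else d.insert jp.2 jp.1) PySem.Dict.empty

-- one step of B's for-loop; state = (d, matched, context)
def order_input_stepB (distractors golds : List String) (first : PySem.Dict Int Int)
    (st : Nat × Int × List String) (i : Int) : Nat × Int × List String :=
  match first.get? i with
  | some j => (st.1, st.2.1 + 1, st.2.2 ++ [(PySem.List.pyGet? golds j).getD ""])
  | none =>
    if st.1 < distractors.length then
      (st.1 + 1, st.2.1, st.2.2 ++ [(PySem.List.pyGet? distractors (st.1 : Int)).getD ""])
    else st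

def order_input_alt (distractors : List String) (golds : List String) (gold_positions : List Int) : List String :=
  let first := order_input_firstB gold_positions
  let total : Int := (distractors.length : Int) + golds.length
  let st := (PySem.List.pyRange 0 total 1).foldl (order_input_stepB distractors golds first)
      (0, 0, [])
  st.2.2 ++ (PySem.List.pyRange (2 - ((golds.length : Int) - st.2.1)) 2 1).map
      (fun k => (PySem.List.pyGet? golds k).getD "")

-- ===== PRECONDITION & SPEC =====
-- Pre_ excludes exactly the inputs on which Python A raises IndexError: a matched
-- position whose first index in gold_positions is not an index into golds, and the
-- leftover-golds loop reading golds[1] from a singleton golds (len(golds) = 1, no match).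
def Pre_order_input (distractors : List String) (golds : List String) (gold_positions : List Int) : Prop :=
  (∀ i ∈ PySem.List.pyRange 0 ((distractors.length : Int) + golds.length) 1,
      i ∈ gold_positions → (PySem.List.index? gold_positions i).getD 0 < golds.length) ∧
  ¬ (golds.length = 1 ∧
      ∀ i ∈ PySem.List.pyRange 0 ((distractors.length : Int) + golds.length) 1, i ∉ gold_positions)
instance (distractors : List String) (golds : List String) (gold_positions : List Int) : Decidable (Pre_order_input distractors golds gold_positions) := by unfold Pre_order_input; infer_instance

def pvWitness_order_input : List String × List String × List Int := (["d1", "d2"], ["g1", "g2"], [0, 3])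

def Spec_order_input (distractors : List String) (golds : List String) (gold_positions : List Int) (out : List String) : Prop := out = order_input_alt distractors golds gold_positions
instance (distractors : List String) (golds : List String) (gold_positions : List Int) (out : List String) : Decidable (Spec_order_input distractors golds gold_positions out) := by unfold Spec_order_input; infer_instance

-- ===== CLAIM (what is proved, stated in full; the proofs are below) =====
def Claim_equal_order_input : Prop := ∀ (distractors : List String) (golds : List String) (gold_positions : List Int), Dom_order_input distractors golds gold_positions → Pre_order_input distractors golds gold_positions → Spec_order_input distractors golds gold_positions (order_input distractors golds gold_positions)

-- ===== LEMMAS AND PROOFS =====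

-- the first-occurrence dict computes List.index?
theorem firstB_get?_aux (p : Int) : ∀ (ps : List Int) (s : Int) (d : PySem.Dict Int Int),
    ((PySem.List.enumerate ps s).foldl
        (fun d jp => if d.contains jp.2 then d else d.insert jp.2 jp.1) d).get? p
      = (d.get? p).or ((PySem.List.index? ps p).map (fun k => s + (k : Int))) := by
  intro ps
  induction ps with
  | nil => intro s d; simp [PySem.List.enumerate_nil, PySem.List.index?]
  | cons x xs ih =>
    intro s d
    rw [PySem.List.enumerate_cons]
    simp only [List.foldl_cons, ih]
    by_cases hpx : p = x
    · subst hpx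
      rw [PySem.List.index?_cons_self]
      by_cases hc : d.contains p = true
      · rw [if_pos hc]
        rw [PySem.Dict.contains_eq_isSome_get?] at hc
        cases hv : d.get? p with
        | none => rw [hv] at hc; simp at hc
        | some v => simp
      · rw [if_neg hc]
        have hnone : d.get? p = none := by
          rw [PySem.Dict.contains_eq_isSome_get?] at hc
          cases hv : d.get? p with
          | none => rfl
          | some v => rw [hv] at hc; simp at hc
        rw [hnone]
        rw [PySem.Dict.get?_insert_self]
        simp
    · rw [PySem.List.index?_cons_of_ne xs (Ne.symm hpx)]
      have hstep : (if d.contains x then d else d.insert x s).get? p = d.get? p := by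
        by_cases hc : d.contains x = true
        · rw [if_pos hc]
        · rw [if_neg hc, PySem.Dict.get?_insert_of_ne d s hpx]
      rw [hstep]
      cases hix : PySem.List.index? xs p with
      | none => simp
      | some k =>
        have hc : s + 1 + (k : Int) = s + ((k : Int) + 1) := by omega
        simp [hc]

theorem firstB_get? (gold_positions : List Int) (p : Int) :
    (order_input_firstB gold_positions).get? p
      = (PySem.List.index? gold_positions p).map (fun k => (k : Int)) := by
  unfold order_input_firstB
  rw [firstB_get?_aux]
  simp [PySem.Dict.get?_empty]

-- coupled invariant of the two main loops
theorem loopAB (distractors golds : List String) (gold_positions : List Int) :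
    ∀ (is : List Int) (d : Nat) (m : Int) (ctx : List String),
    is.foldl (order_input_stepA golds gold_positions)
        (distractors.drop d, ctx, (golds.length : Int) - m)
      = (distractors.drop
            (is.foldl (order_input_stepB distractors golds (order_input_firstB gold_positions)) (d, m, ctx)).1,
         (is.foldl (order_input_stepB distractors golds (order_input_firstB gold_positions)) (d, m, ctx)).2.2,
         (golds.length : Int) -
            (is.foldl (order_input_stepB distractors golds (order_input_firstB gold_positions)) (d, m, ctx)).2.1) := by
  intro is
  induction is with
  | nil => intro d m ctx; rfl
  | cons i rest ih =>
    intro d m ctx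
    simp only [List.foldl_cons]
    by_cases hmem : i ∈ gold_positions
    · have hcont : gold_positions.contains i = true := by
        simpa [List.contains_iff_mem] using hmem
      obtain ⟨k, hk⟩ : ∃ k, PySem.List.index? gold_positions i = some k := by
        have hs := (PySem.List.index?_isSome_iff (xs := gold_positions) (v := i)).mpr hmem
        cases h : PySem.List.index? gold_positions i with
        | none => rw [h] at hs; simp at hs
        | some k => exact ⟨k, rfl⟩
      have hB : order_input_stepB distractors golds (order_input_firstB gold_positions) (d, m, ctx) i
          = (d, m + 1, ctx ++ [(PySem.List.pyGet? golds (k : Int)).getD ""]) := by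
        unfold order_input_stepB
        rw [firstB_get?, hk]
        rfl
      have hA : order_input_stepA golds gold_positions (distractors.drop d, ctx, (golds.length : Int) - m) i
          = (distractors.drop d, ctx ++ [(PySem.List.pyGet? golds (k : Int)).getD ""], (golds.length : Int) - (m + 1)) := by
        unfold order_input_stepA
        rw [if_pos hcont, hk]
        simp only [Option.bind_some, Prod.mk.injEq]
        exact ⟨trivial, trivial, by omega⟩
      rw [hA, hB, ih]
    · have hidx : PySem.List.index? gold_positions i = none :=
        (PySem.List.index?_eq_none_iff (xs := gold_positions) (v := i)).mpr hmem
      have hB : order_input_stepB distractors golds (order_input_firstB gold_positions) (d, m, ctx) i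
          = if d < distractors.length
              then (d + 1, m, ctx ++ [(PySem.List.pyGet? distractors (d : Int)).getD ""])
              else (d, m, ctx) := by
        unfold order_input_stepB
        rw [firstB_get?, hidx]
        rfl
      by_cases hd : d < distractors.length
      · have hdrop : distractors.drop d = distractors[d] :: distractors.drop (d + 1) :=
          List.drop_eq_getElem_cons hd
        have hsome : distractors[d]? = some distractors[d] := List.getElem?_eq_getElem hd
        have hA : order_input_stepA golds gold_positions (distractors.drop d, ctx, (golds.length : Int) - m) i
            = (distractors.drop (d + 1), ctx ++ [distractors[d]], (golds.length : Int) - m) := by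
          unfold order_input_stepA
          rw [if_neg (by simpa using hmem)]
          rw [if_pos (show 0 < (distractors.drop d).length by
            simp only [List.length_drop]; omega)]
          rw [hdrop, PySem.List.pop?_zero_cons]
        have hgetB : (PySem.List.pyGet? distractors (d : Int)).getD "" = distractors[d] := by
          rw [PySem.List.pyGet?_natCast, hsome]
          rfl
        rw [hA, hB, if_pos hd, hgetB, ih]
      · have hA : order_input_stepA golds gold_positions (distractors.drop d, ctx, (golds.length : Int) - m) i
            = (distractors.drop d, ctx, (golds.length : Int) - m) := by
          unfold order_input_stepA
          rw [if_neg (by simpa using hmem)]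
          rw [if_neg (by simp only [List.length_drop]; omega)]
        rw [hA, hB, if_neg hd, ih]

-- A's trailing loop equals B's range-comprehension tail
theorem tailA_eq_aux (golds : List String) :
    ∀ (n : Nat) (g : Int), g ≤ (n : Int) → ∀ (ctx : List String),
    order_input_tailA golds ctx g
      = ctx ++ (PySem.List.pyRange (2 - g) 2 1).map
          (fun k => (PySem.List.pyGet? golds k).getD "") := by
  intro n
  induction n with
  | zero =>
    intro g hg ctx
    unfold order_input_tailA
    rw [dif_neg (by omega)]
    rw [PySem.List.pyRange_one_eq_nil (by omega)]
    simp
  | succ n ih =>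
    intro g hg ctx
    unfold order_input_tailA
    by_cases hpos : 0 < g
    · rw [dif_pos hpos]
      rw [ih (g - 1) (by omega)]
      rw [PySem.List.pyRange_one_cons (a := 2 - g) (b := 2) (by omega)]
      have h2 : 2 - g + 1 = 2 - (g - 1) := by omega
      rw [List.map_cons, h2]
      simp
    · rw [dif_neg hpos]
      rw [PySem.List.pyRange_one_eq_nil (by omega)]
      simp

theorem tailA_eq (golds : List String) (g : Int) (ctx : List String) :
    order_input_tailA golds ctx g
      = ctx ++ (PySem.List.pyRange (2 - g) 2 1).map
          (fun k => (PySem.List.pyGet? golds k).getD "") :=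
  tailA_eq_aux golds g.toNat g (by omega) ctx

-- the two ports agree on every input (Pre_ is only needed for faithfulness to Python)
theorem order_input_eq_alt (distractors golds : List String) (gold_positions : List Int) :
    order_input distractors golds gold_positions = order_input_alt distractors golds gold_positions := by
  unfold order_input order_input_alt
  have h := loopAB distractors golds gold_positions
      (PySem.List.pyRange 0 ((distractors.length : Int) + golds.length) 1) 0 0 []
  simp only [List.drop_zero, Int.sub_zero] at h
  simp only [h]
  exact tailA_eq golds _ _

-- ===== VERDICT (by name: the statement is the Claim_ definition above) =====
theorem order_input_spec : Claim_equal_order_input := by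
  intro distractors golds gold_positions _ _
  unfold Spec_order_input
  exact order_input_eq_alt distractors golds gold_positions
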